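-- pv_equiv track=rewrite | github.com/Czuba77/CS-2nd-year | AI/GeneticAlgo/for_students.py | population_best
-- ===== SOURCE A (Python) =====
-- from itertools import compress
--
-- def fitness(items, knapsack_max_capacity, individual):
--     total_weight = sum(compress(items['Weight'], individual))
--     if total_weight > knapsack_max_capacity:
--         return 0
--     return sum(compress(items['Value'], individual))
--
-- def population_best(items, knapsack_max_capacity, population):
--     best_individual = None
--     population_fitness = []
--     best_individual_fitness = -1
--     for individual in population:
--         individual_fitness = fitness(items, knapsack_max_capacity, individual)
--         population_fitness.append(individual_fitness)
--         if individual_fitness > best_individual_fitness: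
--             best_individual = individual
--             best_individual_fitness = individual_fitness
--     return best_individual, best_individual_fitness, population_fitness
-- ===== SOURCE B (Python) =====
-- def fitness(items, knapsack_max_capacity, individual):
--     total_weight = sum(w for w, s in zip(items['Weight'], individual) if s)
--     if total_weight > knapsack_max_capacity:
--         return 0
--     return sum(v for v, s in zip(items['Value'], individual) if s)
--
--
-- def population_best(items, knapsack_max_capacity, population):
--     # Divide-and-conquer tournament: recursively find the best of each half
--     # (ties go left, i.e. to the earlier individual) and concatenate the
--     # fitness tables of the halves.
--     if not population:
--         return None, -1, []
--
--     def go(lo, hi):  # the half-open slice population[lo:hi], hi - lo >= 1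
--         if hi - lo == 1:
--             ind = population[lo]
--             f = fitness(items, knapsack_max_capacity, ind)
--             return ind, f, [f]
--         mid = (lo + hi) // 2
--         best_l, fit_l, table_l = go(lo, mid)
--         best_r, fit_r, table_r = go(mid, hi)
--         if fit_r > fit_l:
--             return best_r, fit_r, table_l + table_r
--         return best_l, fit_l, table_l + table_r
--
--     return go(0, len(population))
-- ===== Notes on version B (the rewrite author's own statement) =====
-- stated objective: alternative
-- what changed: Replaces A's single left-to-right running-argmax loop with mutable best/best-fitness state by a divide-and-conquer tournament: the population is recursively split in half, each half returns its (best, best fitness, fitness table), and the halves are merged with a left-biased comparison and table concatenation; fitness sums zip-filtered pairs instead of itertools.compress.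
-- outside the precondition, e.g. on population_best({'Weight': [1], 'Value': [2]}, 0, []): A returns (None, -1, []), B returns (None, -1, []); on population_best({'Weight': [5]}, 0, [[1]]): A returns ([1], 0, [0]), B returns ([1], 0, [0])
import Mathlib
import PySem

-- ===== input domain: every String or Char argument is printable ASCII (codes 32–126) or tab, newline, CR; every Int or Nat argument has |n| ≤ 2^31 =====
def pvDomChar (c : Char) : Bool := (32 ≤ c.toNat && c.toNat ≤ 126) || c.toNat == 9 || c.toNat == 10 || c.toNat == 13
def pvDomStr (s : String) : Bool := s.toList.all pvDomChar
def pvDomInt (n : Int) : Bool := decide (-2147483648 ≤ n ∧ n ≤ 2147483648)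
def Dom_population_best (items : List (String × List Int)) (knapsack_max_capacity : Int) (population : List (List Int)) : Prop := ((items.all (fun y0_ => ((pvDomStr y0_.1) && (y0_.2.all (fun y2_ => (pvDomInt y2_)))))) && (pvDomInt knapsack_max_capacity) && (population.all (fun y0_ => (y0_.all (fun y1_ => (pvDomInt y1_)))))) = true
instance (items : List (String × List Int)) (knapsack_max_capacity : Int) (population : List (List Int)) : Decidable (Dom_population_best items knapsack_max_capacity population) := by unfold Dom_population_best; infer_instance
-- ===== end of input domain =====

-- B replaces A's single running-argmax loop by a divide-and-conquer tournament over the population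
-- (split in half, recurse, merge with a left-biased comparison and concatenate the fitness tables);
-- objective: alternative. Equivalence is claimed on Pre_ (both keys present, some individual of fitness ≥ 0).

-- ===== PORT A =====
-- itertools.compress(xs, sel): elements of xs whose selector is truthy (nonzero); zip truncates to the shorter list
def pyCompress (xs sel : List Int) : List Int :=
  (xs.zip sel).foldr (fun p acc => if p.2 ≠ 0 then p.1 :: acc else acc) []

-- fitness from A; items['Weight'] is dict lookup — the .getD [] default is only a totalization guard
-- (a missing key is a KeyError in Python, excluded by Pre_)
def fitnessA (items : List (String × List Int)) (knapsack_max_capacity : Int) (individual : List Int) : Int :=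
  let total_weight := (pyCompress ((PySem.Dict.mk items).getD "Weight" []) individual).sum
  if total_weight > knapsack_max_capacity then 0
  else (pyCompress ((PySem.Dict.mk items).getD "Value" []) individual).sum

def population_best (items : List (String × List Int)) (knapsack_max_capacity : Int) (population : List (List Int)) : List Int × Int × List Int :=
  let st := population.foldl
    (fun (st : Option (List Int) × Int × List Int) individual =>
      let f := fitnessA items knapsack_max_capacity individual
      let pf := st.2.2 ++ [f]
      if f > st.2.1 then (some individual, f, pf) else (st.1, st.2.1, pf))
    (none, -1, [])
  (st.1.getD [], st.2.1, st.2.2)  -- best_individual = None (empty / all-negative population) is rendered as []; excluded by Pre_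

-- ===== PORT B =====
-- B's fitness: generator-expression sums over zip(xs, individual) with an if-filter
def fitnessB (items : List (String × List Int)) (knapsack_max_capacity : Int) (individual : List Int) : Int :=
  let total_weight := (((PySem.Dict.mk items).getD "Weight" []).zip individual).foldl
      (fun a p => if p.2 ≠ 0 then a + p.1 else a) 0
  if total_weight > knapsack_max_capacity then 0
  else (((PySem.Dict.mk items).getD "Value" []).zip individual).foldl
      (fun a p => if p.2 ≠ 0 then a + p.1 else a) 0

-- B's inner recursion go(lo, hi) over the half-open slice population[lo:hi]; every call has lo < hi ≤ len.
-- The base branch fires when hi - lo == 1 as in the Python; '≤ lo + 1' and '.getD []' only totalize the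
-- unreachable hi ≤ lo case.
def pvGoB (f : List Int → Int) (pop : List (List Int)) (lo hi : Nat) : List Int × Int × List Int :=
  if _h : hi ≤ lo + 1 then
    let ind := (PySem.List.pyGet? pop (lo : Int)).getD []   -- population[lo]
    (ind, f ind, [f ind])
  else
    let mid := (lo + hi) / 2
    let L := pvGoB f pop lo mid
    let R := pvGoB f pop mid hi
    if R.2.1 > L.2.1 then (R.1, R.2.1, L.2.2 ++ R.2.2)
    else (L.1, L.2.1, L.2.2 ++ R.2.2)
  termination_by hi - lo
  decreasing_by all_goals omega

def population_best_alt (items : List (String × List Int)) (knapsack_max_capacity : Int) (population : List (List Int)) : List Int × Int × List Int :=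
  if population.isEmpty then ([], -1, [])   -- Python B returns (None, -1, []); None rendered as []
  else pvGoB (fitnessB items knapsack_max_capacity) population 0 population.length

-- ===== PRECONDITION & SPEC =====
-- Pre_-only copy of the fitness formula (independent of the ports)
def pvFit (items : List (String × List Int)) (cap : Int) (ind : List Int) : Int :=
  let ws := ((PySem.Dict.mk items).get? "Weight").getD []
  let vs := ((PySem.Dict.mk items).get? "Value").getD []
  if (((ws.zip ind).filter (fun p => p.2 != 0)).map Prod.fst).sum > cap then 0
  else (((vs.zip ind).filter (fun p => p.2 != 0)).map Prod.fst).sum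

-- Pre_ excludes: populations whose every fitness is ≤ -1, including the empty one (A returns best_individual = None there,
-- not a list of ints, while B returns the actual least-bad individual with its true fitness), and items
-- missing the 'Weight'/'Value' key (A raises KeyError, except in the accidental corner where 'Value' is
-- never read because every individual is overweight).
def Pre_population_best (items : List (String × List Int)) (knapsack_max_capacity : Int) (population : List (List Int)) : Prop :=
  ((PySem.Dict.mk items).get? "Weight").isSome ∧ ((PySem.Dict.mk items).get? "Value").isSome ∧
  ∃ ind ∈ population, 0 ≤ pvFit items knapsack_max_capacity ind

instance (items : List (String × List Int)) (knapsack_max_capacity : Int) (population : List (List Int)) : Decidable (Pre_population_best items knapsack_max_capacity population) := by unfold Pre_population_best; infer_instance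

def pvWitness_population_best : (List (String × List Int)) × Int × List (List Int) :=
  ([("Weight", [1]), ("Value", [2])], 10, [[1]])

def Spec_population_best (items : List (String × List Int)) (knapsack_max_capacity : Int) (population : List (List Int)) (out : List Int × Int × List Int) : Prop := out = population_best_alt items knapsack_max_capacity population
instance (items : List (String × List Int)) (knapsack_max_capacity : Int) (population : List (List Int)) (out : List Int × Int × List Int) : Decidable (Spec_population_best items knapsack_max_capacity population out) := by unfold Spec_population_best; infer_instance

-- ===== CLAIM (what is proved, stated in full; the proofs are below) =====
def Claim_equal_population_best : Prop := ∀ (items : List (String × List Int)) (knapsack_max_capacity : Int) (population : List (List Int)), Dom_population_best items knapsack_max_capacity population → Pre_population_best items knapsack_max_capacity population → Spec_population_best items knapsack_max_capacity population (population_best items knapsack_max_capacity population)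

-- ===== LEMMAS AND PROOFS =====

-- the two fitness implementations agree
theorem foldl_condsum_eq_sum_foldr (l : List (Int × Int)) :
    ∀ a : Int, l.foldl (fun a p => if p.2 ≠ 0 then a + p.1 else a) a
      = a + (l.foldr (fun p acc => if p.2 ≠ 0 then p.1 :: acc else acc) []).sum := by
  induction l with
  | nil => intro a; simp
  | cons p l ih =>
    intro a
    simp only [List.foldl_cons, List.foldr_cons, ih]
    by_cases h : p.2 ≠ 0
    · simp [h]; ring
    · simp [h]

theorem compress_eq_filter (xs sel : List Int) :
    pyCompress xs sel = ((xs.zip sel).filter (fun p => p.2 != 0)).map Prod.fst := by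
  unfold pyCompress
  induction xs.zip sel with
  | nil => rfl
  | cons p l ih =>
    simp only [List.foldr_cons, List.filter_cons, ih]
    by_cases h : p.2 = 0
    · simp [h]
    · simp [h]

theorem fitness_eq : fitnessA = fitnessB := by
  funext items cap ind
  simp only [fitnessA, fitnessB, pyCompress, foldl_condsum_eq_sum_foldr, zero_add]

theorem pvFit_eq (items : List (String × List Int)) (cap : Int) (ind : List Int) :
    pvFit items cap ind = fitnessA items cap ind := by
  simp [pvFit, fitnessA, compress_eq_filter, PySem.Dict.getD_eq_get?_getD]

-- maximum of a non-empty list of ints, Python-max style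
def pvMx : List Int → Int
  | [] => -1
  | x :: t => t.foldl max x

theorem foldl_max_comm (l : List Int) : ∀ a b : Int, l.foldl max (max a b) = max a (l.foldl max b) := by
  induction l with
  | nil => intro a b; simp
  | cons x l ih =>
    intro a b
    simp only [List.foldl_cons, max_assoc, ih]

theorem pvMx_mem (l : List Int) (h : l ≠ []) : pvMx l ∈ l := by
  obtain ⟨x, t, rfl⟩ := List.exists_cons_of_ne_nil h
  rcases PySem.List.foldl_max_mem t x with h1 | h1
  · simp [pvMx, h1]
  · exact List.mem_cons_of_mem _ (by simpa [pvMx] using h1)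

theorem le_pvMx (l : List Int) (v : Int) (h : v ∈ l) : v ≤ pvMx l := by
  obtain ⟨x, t, rfl⟩ := List.exists_cons_of_ne_nil (List.ne_nil_of_mem h)
  rcases List.mem_cons.mp h with rfl | hh
  · exact (PySem.List.le_foldl_max t v).1
  · exact (PySem.List.le_foldl_max t x).2 _ hh

theorem pvMx_append (l1 l2 : List Int) (h1 : l1 ≠ []) (h2 : l2 ≠ []) :
    pvMx (l1 ++ l2) = max (pvMx l1) (pvMx l2) := by
  obtain ⟨x, t, rfl⟩ := List.exists_cons_of_ne_nil h1
  obtain ⟨y, u, rfl⟩ := List.exists_cons_of_ne_nil h2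
  simp only [pvMx, List.cons_append, List.foldl_append, List.foldl_cons]
  exact foldl_max_comm u (t.foldl max x) y

theorem foldl_neg1_eq_pvMx (l : List Int) (h : l ≠ []) (h2 : -1 ≤ pvMx l) :
    l.foldl max (-1) = pvMx l := by
  obtain ⟨x, t, rfl⟩ := List.exists_cons_of_ne_nil h
  simp only [List.foldl_cons]
  have : max (-1 : Int) x = max (-1) x := rfl
  rw [show (max (-1 : Int) x) = max (-1) x from rfl, foldl_max_comm]
  simp only [pvMx] at h2 ⊢
  omega

-- characterisation of A's running-argmax loop: final best = first element attaining the running max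
theorem aloop_char (f : List Int → Int) (l : List (List Int)) :
    ∀ (b0 : Option (List Int)) (m0 : Int) (acc : List Int),
    l.foldl
      (fun (st : Option (List Int) × Int × List Int) individual =>
        let fv := f individual
        let pf := st.2.2 ++ [fv]
        if fv > st.2.1 then (some individual, fv, pf) else (st.1, st.2.1, pf))
      (b0, m0, acc)
    = ((if m0 < (l.map f).foldl max m0
          then l.find? (fun x => decide ((l.map f).foldl max m0 ≤ f x))
          else b0),
       (l.map f).foldl max m0, acc ++ l.map f) := by
  induction l with
  | nil => intro b0 m0 acc; simp
  | cons p rest ih =>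
    intro b0 m0 acc
    simp only [List.foldl_cons, List.map_cons]
    by_cases h : f p > m0
    · rw [if_pos h]
      simp only [ih]
      have hmax : max m0 (f p) = f p := max_eq_right (le_of_lt h)
      simp only [hmax]
      set M := (rest.map f).foldl max (f p) with hM
      have hfpM : f p ≤ M := (PySem.List.le_foldl_max (rest.map f) (f p)).1
      have hm0M : m0 < M := lt_of_lt_of_le h hfpM
      rw [if_pos hm0M]
      by_cases hEq : M ≤ f p
      · have : ¬ (f p < M) := by omega
        rw [if_neg this, List.find?_cons_of_pos (by simpa using hEq)]
        simp
      · have hlt : f p < M := by omega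
        rw [if_pos hlt, List.find?_cons_of_neg (by simpa using hEq)]
        simp
    · rw [if_neg h]
      simp only [ih]
      have hmax : max m0 (f p) = m0 := max_eq_left (by omega)
      simp only [hmax]
      by_cases hm0M : m0 < (rest.map f).foldl max m0
      · rw [if_pos hm0M, if_pos hm0M,
          List.find?_cons_of_neg (by simp; omega)]
        simp
      · rw [if_neg hm0M, if_neg hm0M]
        simp

-- the slice population[lo:hi]
def pvSl (pop : List (List Int)) (lo hi : Nat) : List (List Int) := (pop.drop lo).take (hi - lo)

theorem pvSl_length (pop : List (List Int)) (lo hi : Nat) (_h1 : lo ≤ hi) (h2 : hi ≤ pop.length) :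
    (pvSl pop lo hi).length = hi - lo := by
  simp [pvSl]; omega

theorem pvSl_ne_nil (pop : List (List Int)) (lo hi : Nat) (h1 : lo < hi) (h2 : hi ≤ pop.length) :
    pvSl pop lo hi ≠ [] := by
  have := pvSl_length pop lo hi (le_of_lt h1) h2
  intro hc
  rw [hc] at this
  simp at this
  omega

theorem pvSl_split (pop : List (List Int)) (lo mid hi : Nat) (h1 : lo ≤ mid) (h2 : mid ≤ hi) :
    pvSl pop lo hi = pvSl pop lo mid ++ pvSl pop mid hi := by
  unfold pvSl
  rw [show hi - lo = (mid - lo) + (hi - mid) by omega, List.take_add]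
  congr 1
  have hd : (pop.drop lo).drop (mid - lo) = pop.drop mid := by
    rw [List.drop_drop]
    congr 1
    omega
  rw [hd]

theorem pvSl_single (pop : List (List Int)) (lo : Nat) (h : lo < pop.length) :
    pvSl pop lo (lo + 1) = [pop[lo]] := by
  unfold pvSl
  rw [show lo + 1 - lo = 1 from by omega, List.drop_eq_getElem_cons h, List.take_succ_cons, List.take_zero]

-- characterisation of B's tournament: (first element attaining the slice max, slice max, fitness table of the slice)
theorem goB_char (f : List Int → Int) (pop : List (List Int)) :
    ∀ (n lo hi : Nat), hi - lo ≤ n → lo < hi → hi ≤ pop.length →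
    pvGoB f pop lo hi =
      (((pvSl pop lo hi).find? (fun x => decide (pvMx ((pvSl pop lo hi).map f) ≤ f x))).getD [],
       pvMx ((pvSl pop lo hi).map f),
       (pvSl pop lo hi).map f) := by
  intro n
  induction n with
  | zero => intro lo hi hn h1 h2; omega
  | succ n ih =>
    intro lo hi hn h1 h2
    rw [pvGoB]
    by_cases hbase : hi ≤ lo + 1
    · rw [dif_pos hbase]
      have hhi : hi = lo + 1 := by omega
      subst hhi
      have hlo : lo < pop.length := by omega
      rw [pvSl_single pop lo hlo]
      simp [PySem.List.pyGet?_natCast, List.getElem?_eq_getElem hlo, pvMx]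
    · rw [dif_neg hbase]
      simp only [gt_iff_lt]
      have hmid1 : lo < (lo + hi) / 2 := by omega
      have hmid2 : (lo + hi) / 2 < hi := by omega
      rw [ih lo ((lo + hi) / 2) (by omega) hmid1 (by omega),
          ih ((lo + hi) / 2) hi (by omega) hmid2 h2]
      set mid := (lo + hi) / 2
      set s1 := pvSl pop lo mid with hs1
      set s2 := pvSl pop mid hi with hs2
      have hn1 : s1 ≠ [] := pvSl_ne_nil pop lo mid hmid1 (by omega)
      have hn2 : s2 ≠ [] := pvSl_ne_nil pop mid hi hmid2 h2
      have hm1 : s1.map f ≠ [] := by simpa using hn1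
      have hm2 : s2.map f ≠ [] := by simpa using hn2
      have hsplit : pvSl pop lo hi = s1 ++ s2 :=
        pvSl_split pop lo mid hi (by omega) (by omega)
      set M1 := pvMx (s1.map f) with hM1
      set M2 := pvMx (s2.map f) with hM2
      have hMmax : pvMx ((pvSl pop lo hi).map f) = max M1 M2 := by
        rw [hsplit, List.map_append, pvMx_append _ _ hm1 hm2]
      have hMapp : List.map f (s1 ++ s2) = s1.map f ++ s2.map f := List.map_append
      by_cases hcmp : M2 > M1
      · rw [if_pos hcmp]
        have hMx : pvMx (List.map f s1 ++ List.map f s2) = M2 := by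
          rw [pvMx_append _ _ hm1 hm2]; omega
        have hnone : s1.find? (fun x => decide (M2 ≤ f x)) = none := by
          apply List.find?_eq_none.mpr
          intro x hx
          have : f x ≤ M1 := le_pvMx _ _ (List.mem_map_of_mem hx)
          simp; omega
        rw [hsplit]
        simp only [hMapp, hMx, List.find?_append]
        simp [hnone]
      · rw [if_neg hcmp]
        have hMx : pvMx (List.map f s1 ++ List.map f s2) = M1 := by
          rw [pvMx_append _ _ hm1 hm2]; omega
        have hsome : (s1.find? (fun x => decide (M1 ≤ f x))).isSome := by
          rw [List.find?_isSome]
          obtain ⟨x, hx, hfx⟩ := List.mem_map.mp (pvMx_mem (s1.map f) hm1)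
          exact ⟨x, hx, by simp; omega⟩
        obtain ⟨y, hy⟩ := Option.isSome_iff_exists.mp hsome
        rw [hsplit]
        simp only [hMapp, hMx, List.find?_append]
        simp [hy]

theorem pvSl_full (pop : List (List Int)) : pvSl pop 0 pop.length = pop := by
  simp [pvSl]

-- ===== VERDICT (by name: the statement is the Claim_ definition above) =====
theorem population_best_spec : Claim_equal_population_best := by
  intro items cap pop _hdom hpre
  obtain ⟨_, _, ind, hmem, hfit⟩ := hpre
  unfold Spec_population_best
  rw [pvFit_eq] at hfit
  have hne : pop ≠ [] := List.ne_nil_of_mem hmem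
  unfold population_best population_best_alt
  rw [← fitness_eq]
  simp only []
  set f := fitnessA items cap with hf
  rw [aloop_char]
  set M := pvMx (pop.map f) with hM
  have hmapne : pop.map f ≠ [] := by simpa using hne
  have hfle : f ind ≤ M := le_pvMx _ _ (List.mem_map_of_mem hmem)
  have hM0 : 0 ≤ M := le_trans hfit hfle
  have hfold : (pop.map f).foldl max (-1) = M :=
    foldl_neg1_eq_pvMx (pop.map f) hmapne (by omega)
  simp only [hfold]
  rw [if_pos (show (-1:Int) < M by omega)]
  have hempty : pop.isEmpty = false := by simpa [List.isEmpty_iff] using hne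
  rw [hempty]
  simp only [Bool.false_eq_true, if_false]
  have hpos : 0 < pop.length := List.length_pos_of_ne_nil hne
  rw [goB_char f pop pop.length 0 pop.length (by omega) hpos le_rfl, pvSl_full]
  simp [hM]
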